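-- pv_equiv track=rewrite | github.com/rvceis/DBMS_LAB_PROJECT | flask_backend/app/services/data_import_service.py | suggest_field_mapping
-- ===== SOURCE A (Python) =====
-- from typing import List, Dict, Any, Tuple
--
-- def suggest_field_mapping(data: List[Dict[str, Any]], schema_fields: List[Dict]) -> Dict[str, str]:
--     """
--     Suggest mapping from data fields to schema fields
--
--     Returns: {data_field: schema_field}
--     """
--     if not data:
--         return {}
--
--     data_fields = list(data[0].keys())
--     schema_field_names = [f['field_name'] for f in schema_fields]
--
--     mapping = {}
--
--     for data_field in data_fields:
--         # Exact match
--         if data_field in schema_field_names: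
--             mapping[data_field] = data_field
--             continue
--
--         # Case-insensitive match
--         lower_data = data_field.lower()
--         for schema_field in schema_field_names:
--             if schema_field.lower() == lower_data:
--                 mapping[data_field] = schema_field
--                 break
--
--         # Fuzzy match (contains)
--         if data_field not in mapping:
--             for schema_field in schema_field_names:
--                 if lower_data in schema_field.lower() or schema_field.lower() in lower_data:
--                     mapping[data_field] = schema_field
--                     break
--
--     return mapping
-- ===== SOURCE B (Python) =====
-- def suggest_field_mapping(data, schema_fields):
--     """Suggest mapping from data fields to schema fields (single-pass best-priority scan)."""
--     if not data:
--         return {}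
--
--     schema_field_names = [f['field_name'] for f in schema_fields]
--     mapping = {}
--
--     for data_field in data[0].keys():
--         lower_data = data_field.lower()
--         best, best_p = None, 0
--         for s in schema_field_names:
--             if s == data_field:
--                 p = 3
--             elif s.lower() == lower_data:
--                 p = 2
--             elif lower_data in s.lower() or s.lower() in lower_data:
--                 p = 1
--             else:
--                 p = 0
--             if p > best_p:
--                 best, best_p = s, p
--                 if p == 3:
--                     break
--         if best_p == 3:
--             mapping[data_field] = data_field
--         elif best_p >= 1:
--             mapping[data_field] = best
--     return mapping
-- ===== Notes on version B (the rewrite author's own statement) =====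
-- stated objective: alternative
-- what changed: A's three sequential scans per data field (exact membership test, case-insensitive first-match loop, then a fuzzy containment loop guarded by a mapping lookup) are replaced by a single pass over the schema names that tracks the best (schema field, priority) with exact=3 > case-insensitive=2 > containment=1 and strict updates, then inserts once from the final best.
import Mathlib
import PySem

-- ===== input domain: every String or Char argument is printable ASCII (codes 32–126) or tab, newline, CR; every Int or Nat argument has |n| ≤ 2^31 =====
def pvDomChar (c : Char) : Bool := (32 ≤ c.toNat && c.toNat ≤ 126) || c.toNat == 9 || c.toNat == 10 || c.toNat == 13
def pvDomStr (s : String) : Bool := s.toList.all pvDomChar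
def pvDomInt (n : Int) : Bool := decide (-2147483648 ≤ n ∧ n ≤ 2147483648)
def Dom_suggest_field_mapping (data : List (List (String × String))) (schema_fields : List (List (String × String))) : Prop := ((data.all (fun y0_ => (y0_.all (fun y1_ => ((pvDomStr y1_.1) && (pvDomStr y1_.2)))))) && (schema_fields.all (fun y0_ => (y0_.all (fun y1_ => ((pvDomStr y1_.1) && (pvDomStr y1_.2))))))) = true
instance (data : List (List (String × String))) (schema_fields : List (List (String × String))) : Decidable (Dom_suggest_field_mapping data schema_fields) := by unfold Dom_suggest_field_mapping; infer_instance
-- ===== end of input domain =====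

-- B replaces A's three sequential scans (exact membership, case-insensitive loop, fuzzy loop)
-- by ONE pass per data field that tracks the best (schema field, priority); objective: alternative.

-- ===== PORT A =====
-- f['field_name'] for an assoc-list dict; the '.getD ""' default is unreachable under Pre_ (Python raises KeyError there)
def pvFieldName (f : List (String × String)) : String :=
  ((PySem.Dict.mk f).get? "field_name").getD ""

-- the body of A's 'for data_field in data_fields' loop, mapping := step
def pvStepA (names : List String) (mapping : PySem.Dict String String) (data_field : String) : PySem.Dict String String :=
  if names.contains data_field then
    mapping.insert data_field data_field
  else
    let lower_data := PySem.Str.lower data_field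
    let mapping :=
      match names.find? (fun schema_field => PySem.Str.lower schema_field == lower_data) with
      | some schema_field => mapping.insert data_field schema_field
      | none => mapping
    if (mapping.get? data_field).isNone then
      match names.find? (fun schema_field =>
          PySem.Str.isIn lower_data (PySem.Str.lower schema_field) ||
          PySem.Str.isIn (PySem.Str.lower schema_field) lower_data) with
      | some schema_field => mapping.insert data_field schema_field
      | none => mapping
    else mapping

def suggest_field_mapping (data : List (List (String × String))) (schema_fields : List (List (String × String))) : List (String × String) :=
  match data with
  | [] => []
  | d0 :: _ =>
    let data_fields := PySem.List.dedup (d0.map Prod.fst)   -- data[0].keys()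
    let schema_field_names := schema_fields.map pvFieldName
    (data_fields.foldl (pvStepA schema_field_names) PySem.Dict.empty).items

-- ===== PORT B =====
-- B's inner loop: best-so-far (schema field, priority), strict update, break at priority 3
def pvBestLoop (names : List String) (data_field lower_data : String)
    (best : Option String) (best_p : Nat) : Option String × Nat :=
  match names with
  | [] => (best, best_p)
  | s :: rest =>
    let p : Nat :=
      if s == data_field then 3
      else if PySem.Str.lower s == lower_data then 2
      else if PySem.Str.isIn lower_data (PySem.Str.lower s) ||
              PySem.Str.isIn (PySem.Str.lower s) lower_data then 1
      else 0
    if p > best_p then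
      if p == 3 then (some s, 3)
      else pvBestLoop rest data_field lower_data (some s) p
    else pvBestLoop rest data_field lower_data best best_p

def pvStepB (names : List String) (mapping : PySem.Dict String String) (data_field : String) : PySem.Dict String String :=
  let lower_data := PySem.Str.lower data_field
  let r := pvBestLoop names data_field lower_data none 0
  if r.2 == 3 then mapping.insert data_field data_field
  else if r.2 ≥ 1 then mapping.insert data_field (r.1.getD "")
  else mapping

def suggest_field_mapping_alt (data : List (List (String × String))) (schema_fields : List (List (String × String))) : List (String × String) :=
  match data with
  | [] => []
  | d0 :: _ =>
    let schema_field_names := schema_fields.map pvFieldName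
    ((PySem.List.dedup (d0.map Prod.fst)).foldl (pvStepB schema_field_names) PySem.Dict.empty).items

-- ===== PRECONDITION & SPEC =====
-- Pre_ excludes inputs where data is nonempty and some schema dict lacks the key 'field_name':
-- Python A (and B) raise KeyError there (with empty data both return {} before touching schema_fields).
def Pre_suggest_field_mapping (data : List (List (String × String))) (schema_fields : List (List (String × String))) : Prop :=
  data ≠ [] → ∀ f ∈ schema_fields, "field_name" ∈ f.map Prod.fst
instance (data : List (List (String × String))) (schema_fields : List (List (String × String))) : Decidable (Pre_suggest_field_mapping data schema_fields) := by unfold Pre_suggest_field_mapping; infer_instance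

def pvWitness_suggest_field_mapping : (List (List (String × String))) × (List (List (String × String))) :=
  ([[("name", "x"), ("age", "1")]], [[("field_name", "Name")], [("field_name", "id")]])

def Spec_suggest_field_mapping (data : List (List (String × String))) (schema_fields : List (List (String × String))) (out : List (String × String)) : Prop := out = suggest_field_mapping_alt data schema_fields
instance (data : List (List (String × String))) (schema_fields : List (List (String × String))) (out : List (String × String)) : Decidable (Spec_suggest_field_mapping data schema_fields out) := by unfold Spec_suggest_field_mapping; infer_instance

-- ===== CLAIM (what is proved, stated in full; the proofs are below) =====
def Claim_equal_suggest_field_mapping : Prop := ∀ (data : List (List (String × String))) (schema_fields : List (List (String × String))), Dom_suggest_field_mapping data schema_fields → Pre_suggest_field_mapping data schema_fields → Spec_suggest_field_mapping data schema_fields (suggest_field_mapping data schema_fields)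

-- ===== LEMMAS AND PROOFS =====

theorem pvBestLoop_from2 (df ld : String) (b : String) :
    ∀ l : List String, l.find? (fun s => s == df) = none →
      pvBestLoop l df ld (some b) 2 = (some b, 2) := by
  intro l
  induction l with
  | nil => intro _; rfl
  | cons s rest ih =>
    intro h
    rw [List.find?_cons] at h
    cases hs : (s == df) with
    | true => simp [hs] at h
    | false =>
      rw [hs] at h
      simp only [pvBestLoop, hs]
      split_ifs with h1 h2 h3 <;> simp_all [ih h]

theorem pvBestLoop_from1 (df ld : String) (b : String) :
    ∀ l : List String, l.find? (fun s => s == df) = none →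
      l.find? (fun s => PySem.Str.lower s == ld) = none →
      pvBestLoop l df ld (some b) 1 = (some b, 1) := by
  intro l
  induction l with
  | nil => intro _ _; rfl
  | cons s rest ih =>
    intro hex hci
    rw [List.find?_cons] at hex hci
    cases hs : (s == df) with
    | true => simp [hs] at hex
    | false =>
      rw [hs] at hex
      cases hc : (PySem.Str.lower s == ld) with
      | true => simp [hc] at hci
      | false =>
        rw [hc] at hci
        simp only [pvBestLoop, hs, hc]
        split_ifs with h1 <;> simp_all [ih hex hci]

theorem pvBestLoop_break (df ld s' : String) :
    ∀ (l : List String) (b : Option String) (bp : Nat), bp ≤ 2 →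
      l.find? (fun s => s == df) = some s' →
      pvBestLoop l df ld b bp = (some s', 3) := by
  intro l
  induction l with
  | nil => intro b bp _ h; simp at h
  | cons t rest ih =>
    intro b bp hbp h
    rw [List.find?_cons] at h
    cases ht : (t == df) with
    | true =>
      rw [ht] at h
      simp only [Option.some.injEq] at h
      subst h
      simp only [pvBestLoop, ht]
      have : 3 > bp := by omega
      simp [this]
    | false =>
      rw [ht] at h
      cases hc : (PySem.Str.lower t == ld) with
      | true =>
        simp only [pvBestLoop, ht, hc]
        norm_num
        split_ifs with h1
        · exact ih _ _ (by omega) h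
        · exact ih _ _ hbp h
      | false =>
        cases hf : (PySem.Str.isIn ld (PySem.Str.lower t) || PySem.Str.isIn (PySem.Str.lower t) ld) with
        | true =>
          simp only [pvBestLoop, ht, hc, hf]
          norm_num
          split_ifs with h1
          · exact ih _ _ (by omega) h
          · exact ih _ _ hbp h
        | false =>
          simp only [pvBestLoop, ht, hc, hf]
          norm_num
          exact ih _ _ hbp h

theorem pvBestLoop_ci (df ld s' : String) :
    ∀ (l : List String) (b : String),
      l.find? (fun s => s == df) = none →
      l.find? (fun s => PySem.Str.lower s == ld) = some s' →
      pvBestLoop l df ld (some b) 1 = (some s', 2) := by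
  intro l
  induction l with
  | nil => intro b _ h; simp at h
  | cons t rest ih =>
    intro b hex hci
    rw [List.find?_cons] at hex hci
    cases ht : (t == df) with
    | true => simp [ht] at hex
    | false =>
      rw [ht] at hex
      cases hc : (PySem.Str.lower t == ld) with
      | true =>
        rw [hc] at hci
        simp only [Option.some.injEq] at hci
        subst hci
        simp only [pvBestLoop, ht, hc]
        norm_num
        exact pvBestLoop_from2 df ld t rest hex
      | false =>
        rw [hc] at hci
        simp only [pvBestLoop, ht, hc]
        split_ifs with h1 <;> simp_all [ih b hex hci]

theorem pvBestLoop_char (df ld : String) :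
    ∀ l : List String,
      pvBestLoop l df ld none 0 =
        match l.find? (fun s => s == df) with
        | some s => (some s, 3)
        | none =>
          match l.find? (fun s => PySem.Str.lower s == ld) with
          | some s => (some s, 2)
          | none =>
            match l.find? (fun s => PySem.Str.isIn ld (PySem.Str.lower s) ||
                PySem.Str.isIn (PySem.Str.lower s) ld) with
            | some s => (some s, 1)
            | none => (none, 0) := by
  intro l
  induction l with
  | nil => rfl
  | cons s rest ih =>
    simp only [List.find?_cons]
    cases hex : (s == df) with
    | true =>
      simp only [pvBestLoop, hex]
      rfl
    | false =>
      cases hci : (PySem.Str.lower s == ld) with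
      | true =>
        simp only [pvBestLoop, hex, hci]
        norm_num
        cases hfind : rest.find? (fun s => s == df) with
        | some s' =>
          have h3 := pvBestLoop_break df ld s' rest (some s) 2 (by omega) hfind
          simp [h3]
        | none => simp [pvBestLoop_from2 df ld s rest hfind]
      | false =>
        cases hfz : (PySem.Str.isIn ld (PySem.Str.lower s) || PySem.Str.isIn (PySem.Str.lower s) ld) with
        | true =>
          simp only [pvBestLoop, hex, hci, hfz]
          norm_num
          cases hfind : rest.find? (fun s => s == df) with
          | some s' =>
            have h3 := pvBestLoop_break df ld s' rest (some s) 1 (by omega) hfind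
            simp [h3]
          | none =>
            cases hfind2 : rest.find? (fun s => PySem.Str.lower s == ld) with
            | some s' =>
              have h2 := pvBestLoop_ci df ld s' rest s hfind hfind2
              simp [h2]
            | none => simp [pvBestLoop_from1 df ld s rest hfind hfind2]
        | false =>
          simp only [pvBestLoop, hex, hci, hfz]
          simpa using ih

theorem pvStep_eq (names : List String) (m : PySem.Dict String String) (df : String)
    (hm : m.get? df = none) : pvStepA names m df = pvStepB names m df := by
  simp only [pvStepA, pvStepB, pvBestLoop_char df (PySem.Str.lower df) names]
  cases hfind : names.find? (fun s => s == df) with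
  | some s =>
    have hmem : df ∈ names := by
      have h1 := List.find?_some hfind
      have h2 := List.mem_of_find?_eq_some hfind
      simpa [show s = df by simpa using h1] using h2
    simp [hmem]
  | none =>
    have hcon : names.contains df = false := by
      rw [List.find?_eq_none] at hfind
      by_contra hc
      have hmem : df ∈ names := by
        simpa using List.contains_iff_exists_mem_beq.mp ((Bool.not_eq_false _).mp hc)
      exact absurd (by simp : ((fun s => s == df) df) = true) (by simpa using hfind df hmem)
    simp only [hcon, Bool.false_eq_true, if_false]
    cases hci : names.find? (fun s => PySem.Str.lower s == PySem.Str.lower df) with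
    | some s => simp [PySem.Dict.get?_insert_self]
    | none =>
      simp only [hm, Option.isNone_none, if_true]
      cases hfz : names.find? (fun s => PySem.Str.isIn (PySem.Str.lower df) (PySem.Str.lower s) ||
          PySem.Str.isIn (PySem.Str.lower s) (PySem.Str.lower df)) with
      | some s => simp
      | none => simp

theorem pvStepB_get?_ne (names : List String) (m : PySem.Dict String String) (df k : String)
    (hk : k ≠ df) : (pvStepB names m df).get? k = m.get? k := by
  simp only [pvStepB]
  split_ifs <;> simp [PySem.Dict.get?_insert_of_ne _ _ hk]

theorem pvFoldl_eq (names : List String) :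
    ∀ (l : List String) (m : PySem.Dict String String), l.Nodup →
      (∀ k ∈ l, m.get? k = none) →
      l.foldl (pvStepA names) m = l.foldl (pvStepB names) m := by
  intro l
  induction l with
  | nil => intro m _ _; rfl
  | cons df rest ih =>
    intro m hnd hm
    simp only [List.foldl_cons, pvStep_eq names m df (hm df (by simp))]
    exact ih (pvStepB names m df) hnd.of_cons (fun k hk =>
      (pvStepB_get?_ne names m df k
        (fun he => (List.nodup_cons.mp hnd).1 (he ▸ hk))).trans (hm k (by simp [hk])))

-- ===== VERDICT (by name: the statement is the Claim_ definition above) =====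
theorem suggest_field_mapping_spec : Claim_equal_suggest_field_mapping := by
  intro data schema_fields _dom _pre
  unfold Spec_suggest_field_mapping
  cases data with
  | nil => rfl
  | cons d0 rest =>
    simp only [suggest_field_mapping, suggest_field_mapping_alt]
    exact congrArg PySem.Dict.items
      (pvFoldl_eq (schema_fields.map pvFieldName) (PySem.List.dedup (d0.map Prod.fst))
        PySem.Dict.empty (PySem.List.nodup_dedup _) (fun k _ => by simp [pysem]))
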